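-- pv_equiv track=rewrite | github.com/FoamyGuy/USB_Cipher_Machine | fizzbuzz_cipher.py | buzz_shift
-- ===== SOURCE A (Python) =====
-- def buzz_shift(target_str):
--     first_half = []
--     second_half = []
--     for i, val in enumerate(target_str):
--         if i % 3 == 0:
--             second_half.append(val)
--         else:
--             first_half.append(val)
--     return "".join(first_half + second_half)
-- ===== SOURCE B (Python) =====
-- def buzz_shift(target_str):
--     nonmult = "".join(c for i, c in enumerate(target_str) if i % 3)
--     return nonmult + target_str[::3]
-- ===== Notes on version B (the rewrite author's own statement) =====
-- stated objective: idiomatic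
-- what changed: Replaces A's single combined partition loop with two separate differently-shaped passes: a filtered comprehension for the non-multiple-of-3 indices and the strided slice target_str[::3] for the multiples.
import Mathlib
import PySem

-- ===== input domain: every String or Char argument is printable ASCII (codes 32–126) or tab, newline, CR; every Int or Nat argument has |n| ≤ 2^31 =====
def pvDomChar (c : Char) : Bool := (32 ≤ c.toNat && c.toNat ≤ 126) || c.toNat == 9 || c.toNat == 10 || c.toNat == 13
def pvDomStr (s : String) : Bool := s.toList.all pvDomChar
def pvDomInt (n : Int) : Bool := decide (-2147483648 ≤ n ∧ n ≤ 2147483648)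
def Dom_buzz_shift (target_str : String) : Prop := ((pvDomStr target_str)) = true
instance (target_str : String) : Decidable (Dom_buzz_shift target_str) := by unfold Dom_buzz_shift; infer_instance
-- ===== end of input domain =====

-- B replaces A's single combined partition loop with two separate passes: a filtered
-- comprehension for non-multiple-of-3 indices and the strided slice [::3] for multiples.


-- ===== PORT A =====
-- one loop over enumerate(target_str), partitioning into two appended accumulators
def buzz_shift (target_str : String) : String :=
  let r := (PySem.List.enumerate target_str.toList).foldl
    (fun acc p =>
      if PySem.Int.mod p.1 3 == 0 then (acc.1, acc.2 ++ [p.2])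
      else (acc.1 ++ [p.2], acc.2))
    ([], [])
  String.ofList (r.1 ++ r.2)  -- "".join(first_half + second_half)

-- ===== PORT B =====
-- non-multiples by a filtered comprehension, multiples by the strided slice [::3]
def buzz_shift_alt (target_str : String) : String :=
  let nonmult := String.ofList
    (((PySem.List.enumerate target_str.toList).filter
        (fun p => PySem.Int.mod p.1 3 != 0)).map Prod.snd)
  nonmult ++ (PySem.Str.slice? target_str none none 3).getD ""

-- ===== PRECONDITION & SPEC =====
def Spec_buzz_shift (target_str : String) (out : String) : Prop := out = buzz_shift_alt target_str
instance (target_str : String) (out : String) : Decidable (Spec_buzz_shift target_str out) := by unfold Spec_buzz_shift; infer_instance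

-- ===== CLAIM (what is proved, stated in full; the proofs are below) =====
def Claim_equal_buzz_shift : Prop := ∀ (target_str : String), Dom_buzz_shift target_str → Spec_buzz_shift target_str (buzz_shift target_str)

-- ===== LEMMAS AND PROOFS =====

-- the non-multiple-of-3 positions of a list (indices 1,2 of every block of 3)
def pvNm3 {α : Type} : List α → List α
  | [] => []
  | [_] => []
  | [_, b] => [b]
  | _ :: b :: c :: t => b :: c :: pvNm3 t

-- every third element (indices 0,3,6,…)
def pvEv3 {α : Type} : List α → List α
  | [] => []
  | [a] => [a]
  | [a, _] => [a]
  | a :: _ :: _ :: t => a :: pvEv3 t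

theorem pv_mod3 (a : Int) : PySem.Int.mod a 3 = a % 3 := by
  simp [PySem.Int.mod, Int.fmod_eq_emod]

theorem pv_foldA (l : List Char) : ∀ (s : Int), s % 3 = 0 →
    ∀ (fh sh : List Char),
    (PySem.List.enumerate l s).foldl
      (fun acc p =>
        if PySem.Int.mod p.1 3 == 0 then (acc.1, acc.2 ++ [p.2])
        else (acc.1 ++ [p.2], acc.2)) (fh, sh)
    = (fh ++ pvNm3 l, sh ++ pvEv3 l) := by
  induction l using pvEv3.induct with
  | case1 =>
      intro s hs fh sh
      simp [PySem.List.enumerate_nil, pvNm3, pvEv3]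
  | case2 a =>
      intro s hs fh sh
      have h1 : (PySem.Int.mod s 3 == 0) = true := by rw [pv_mod3, hs]; rfl
      simp only [PySem.List.enumerate_cons, PySem.List.enumerate_nil, List.foldl_cons,
        List.foldl_nil, h1, if_true]
      simp [pvNm3, pvEv3]
  | case3 a b =>
      intro s hs fh sh
      have h1 : (PySem.Int.mod s 3 == 0) = true := by rw [pv_mod3, hs]; rfl
      have h2 : (PySem.Int.mod (s + 1) 3 == 0) = false := by
        rw [pv_mod3]; have : (s + 1) % 3 = 1 := by omega
        rw [this]; rfl
      simp only [PySem.List.enumerate_cons, PySem.List.enumerate_nil, List.foldl_cons,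
        List.foldl_nil, h1, h2, if_true, Bool.false_eq_true, if_false]
      simp [pvNm3, pvEv3]
  | case4 a b c t ih =>
      intro s hs fh sh
      have h1 : (PySem.Int.mod s 3 == 0) = true := by rw [pv_mod3, hs]; rfl
      have h2 : (PySem.Int.mod (s + 1) 3 == 0) = false := by
        rw [pv_mod3]; have : (s + 1) % 3 = 1 := by omega
        rw [this]; rfl
      have h3 : (PySem.Int.mod (s + 1 + 1) 3 == 0) = false := by
        rw [pv_mod3]; have : (s + 1 + 1) % 3 = 2 := by omega
        rw [this]; rfl
      have h4 : (s + 1 + 1 + 1) % 3 = 0 := by omega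
      simp only [PySem.List.enumerate_cons, List.foldl_cons, h1, h2, h3, if_true,
        Bool.false_eq_true, if_false]
      rw [ih (s + 1 + 1 + 1) h4]
      simp [pvNm3, pvEv3]

theorem pv_filterB (l : List Char) : ∀ (s : Int), s % 3 = 0 →
    ((PySem.List.enumerate l s).filter
        (fun p => PySem.Int.mod p.1 3 != 0)).map Prod.snd = pvNm3 l := by
  induction l using pvEv3.induct with
  | case1 =>
      intro s hs; simp [PySem.List.enumerate_nil, pvNm3]
  | case2 a =>
      intro s hs
      have h1 : (PySem.Int.mod s 3 != 0) = false := by rw [pv_mod3, hs]; rfl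
      simp only [PySem.List.enumerate_cons, PySem.List.enumerate_nil, List.filter_cons,
        List.filter_nil, h1, Bool.false_eq_true, if_false]
      simp [pvNm3]
  | case3 a b =>
      intro s hs
      have h1 : (PySem.Int.mod s 3 != 0) = false := by rw [pv_mod3, hs]; rfl
      have h2 : (PySem.Int.mod (s + 1) 3 != 0) = true := by
        rw [pv_mod3]; have : (s + 1) % 3 = 1 := by omega
        rw [this]; rfl
      simp only [PySem.List.enumerate_cons, PySem.List.enumerate_nil, List.filter_cons,
        List.filter_nil, h1, h2, Bool.false_eq_true, if_false, if_true]
      simp [pvNm3]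
  | case4 a b c t ih =>
      intro s hs
      have h1 : (PySem.Int.mod s 3 != 0) = false := by rw [pv_mod3, hs]; rfl
      have h2 : (PySem.Int.mod (s + 1) 3 != 0) = true := by
        rw [pv_mod3]; have : (s + 1) % 3 = 1 := by omega
        rw [this]; rfl
      have h3 : (PySem.Int.mod (s + 1 + 1) 3 != 0) = true := by
        rw [pv_mod3]; have : (s + 1 + 1) % 3 = 2 := by omega
        rw [this]; rfl
      have h4 : (s + 1 + 1 + 1) % 3 = 0 := by omega
      simp only [PySem.List.enumerate_cons, List.filter_cons, h1, h2, h3,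
        Bool.false_eq_true, if_false, if_true, List.map_cons]
      rw [ih (s + 1 + 1 + 1) h4]
      simp [pvNm3]

theorem pv_stride (l : List Char) :
    List.filterMap (fun k : Nat => l[(3 * k : Nat)]?) (List.range ((l.length + 2) / 3))
    = pvEv3 l := by
  induction l using pvEv3.induct with
  | case1 => simp [pvEv3]
  | case2 a => simp [pvEv3, List.range_succ_eq_map]
  | case3 a b => simp [pvEv3, List.range_succ_eq_map]
  | case4 a b c t ih =>
      have hlen : ((a :: b :: c :: t).length + 2) / 3 = (t.length + 2) / 3 + 1 := by
        simp; omega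
      rw [hlen, List.range_succ_eq_map, List.filterMap_cons, List.filterMap_map]
      have hcongr : ∀ k ∈ List.range ((t.length + 2) / 3),
          ((fun k : Nat => (a :: b :: c :: t)[(3 * k : Nat)]?) ∘ Nat.succ) k
          = (fun k : Nat => t[(3 * k : Nat)]?) k := by
        intro k _
        have h3 : 3 * Nat.succ k = (3 * k) + 3 := by omega
        simp [Function.comp, h3]
      rw [List.filterMap_congr hcongr, ih]
      simp [pvEv3]

theorem pv_slice (l : List Char) :
    (PySem.List.slice? l none none 3).getD [] = pvEv3 l := by
  rw [← pv_stride l]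
  simp only [PySem.List.slice?, PySem.List.sliceIndices]
  norm_num
  rcases l with _ | ⟨a, t⟩
  · simp
  · rw [if_pos (by simp)]
    have hc : ((((a :: t).length : Int) + 3 - 1) / 3).toNat = ((a :: t).length + 2) / 3 := by
      omega
    rw [hc]
    apply List.filterMap_congr
    intro k _
    congr 1

-- ===== VERDICT (by name: the statement is the Claim_ definition above) =====
theorem buzz_shift_spec : Claim_equal_buzz_shift := by
  intro s _
  unfold Spec_buzz_shift buzz_shift buzz_shift_alt
  rw [show ((PySem.List.enumerate s.toList) = PySem.List.enumerate s.toList 0) from rfl]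
  rw [pv_foldA s.toList 0 (by decide) [] []]
  rw [pv_filterB s.toList 0 (by decide)]
  simp only [PySem.Str.slice?, PySem.Chars.slice?_eq_listSlice?]
  have hmap : (Option.map String.ofList (PySem.List.slice? s.toList none none 3)).getD ""
      = String.ofList ((PySem.List.slice? s.toList none none 3).getD []) := by
    rcases PySem.List.slice? s.toList none none 3 with _ | x
    · rfl
    · rfl
  rw [hmap, pv_slice]
  simp only [List.nil_append, String.ofList_append]
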